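-- pv_equiv track=rewrite | github.com/tomqwrtyu/puzzleArm | src/algo/src/puzzlealgo.py | rep_node
-- ===== SOURCE A (Python) =====
-- import math
--
-- def rep_node(node):
--     ret = ""
--     cells = int(math.sqrt(len(node)))
--     for count, val in enumerate(node):
--         if not val:
--             val = "N"
--         if (count + 1) % cells > 0:
--             ret += " %s |" % val
--         else:
--             ret += " %s\n" % val
--     return ret
-- ===== SOURCE B (Python) =====
-- import math
--
-- def rep_node(node):
--     # Row-wise: chunk the list into rows of length int(sqrt(n)), render each row once.
--     if not node:
--         return ""
--     cells = int(math.sqrt(len(node)))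
--     parts = []
--     rest = node
--     while rest:
--         row = rest[:cells]
--         parts.append(" " + " | ".join("N" if not v else str(v) for v in row))
--         parts.append("\n" if len(row) == cells else " |")
--         rest = rest[cells:]
--     return "".join(parts)
-- ===== Notes on version B (the rewrite author's own statement) =====
-- stated objective: simpler
-- what changed: B slices the list into rows of sqrt(n) cells and renders each row once with ' | '.join plus a row terminator, instead of A's per-element loop testing (index+1) % cells on every element.
import Mathlib
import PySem

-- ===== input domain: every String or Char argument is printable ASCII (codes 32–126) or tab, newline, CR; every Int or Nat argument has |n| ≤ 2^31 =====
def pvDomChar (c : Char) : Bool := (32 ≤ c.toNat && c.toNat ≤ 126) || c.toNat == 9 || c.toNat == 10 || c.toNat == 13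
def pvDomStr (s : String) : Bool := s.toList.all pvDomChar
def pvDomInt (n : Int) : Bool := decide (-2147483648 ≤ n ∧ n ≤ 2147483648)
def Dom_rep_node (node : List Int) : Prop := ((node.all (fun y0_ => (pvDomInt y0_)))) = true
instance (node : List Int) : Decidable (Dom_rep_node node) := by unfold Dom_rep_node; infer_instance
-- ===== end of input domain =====

-- B renders the grid row by row (chunk + join) instead of A's per-element fold with a
-- modulus test on a running index; objective: simpler decomposition, same output.

-- ===== PORT A =====
-- int(math.sqrt(len(node))) is ported as Nat.sqrt, exact for lengths below 2^52.
def rep_node (node : List Int) : String :=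
  let cells := Nat.sqrt node.length
  (PySem.List.enumerate node 0).foldl (fun ret cv =>
    let val := if cv.2 = 0 then "N" else PySem.Int.toStr cv.2
    if PySem.Int.mod (cv.1 + 1) (cells : Int) > 0 then ret ++ (" " ++ val ++ " |")
    else ret ++ (" " ++ val ++ "\n")) ""

-- ===== PORT B =====
-- the while loop of Source B: consume `rest` one row (rest[:cells]) at a time;
-- the positivity argument is the termination witness (cells ≥ 1 whenever the loop runs).
def pvRowsB (cells : Nat) (hc : 0 < cells) (rest : List Int) : String :=
  if h : rest = [] then ""
  else
    let row := PySem.List.slice rest none (some (cells : Int))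
    ((" " ++ PySem.Str.join " | "
        (row.map (fun v => if v = 0 then "N" else PySem.Int.toStr v))) ++
     (if row.length = cells then "\n" else " |")) ++
    pvRowsB cells hc (PySem.List.slice rest (some (cells : Int)) none)
termination_by rest.length
decreasing_by
  simp only [PySem.List.slice_from_natCast, List.length_drop]
  have : 0 < rest.length := List.length_pos_iff.mpr h
  omega

def rep_node_alt (node : List Int) : String :=
  if h : node = [] then ""
  else
    pvRowsB (Nat.sqrt node.length)
      (Nat.sqrt_pos.mpr (List.length_pos_iff.mpr h)) node

-- ===== PRECONDITION & SPEC =====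
def Spec_rep_node (node : List Int) (out : String) : Prop := out = rep_node_alt node
instance (node : List Int) (out : String) : Decidable (Spec_rep_node node out) := by unfold Spec_rep_node; infer_instance

-- ===== CLAIM (what is proved, stated in full; the proofs are below) =====
def Claim_equal_rep_node : Prop := ∀ (node : List Int), Dom_rep_node node → Spec_rep_node node (rep_node node)

-- ===== LEMMAS AND PROOFS =====

-- one cell rendered, at char level
def pvCellC (v : Int) : List Char := if v = 0 then ['N'] else PySem.Int.toChars v

-- A's loop from counter k, at char level
def pvFA (c : Nat) (k : Nat) : List Int → List Char
  | [] => []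
  | v :: t =>
      ((' ' :: pvCellC v) ++ (if (k + 1) % c > 0 then [' ', '|'] else ['\n'])) ++ pvFA c (k + 1) t

lemma pvFA_mod (c : Nat) (l : List Int) : ∀ k, pvFA c k l = pvFA c (k % c) l := by
  induction l with
  | nil => intro k; rfl
  | cons v t ih =>
    intro k
    have hcond : (k % c + 1) % c = (k + 1) % c := by
      conv_lhs => rw [Nat.add_mod]
      conv_rhs => rw [Nat.add_mod]
      simp
    simp only [pvFA, ih (k + 1), ih (k % c + 1), hcond]

-- A's port equals pvFA
lemma pvA_toList (c : Nat) (l : List Int) : ∀ (s : Nat) (acc : String),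
    ((PySem.List.enumerate l (s : Int)).foldl (fun ret cv =>
      let val := if cv.2 = 0 then "N" else PySem.Int.toStr cv.2
      if PySem.Int.mod (cv.1 + 1) (c : Int) > 0 then ret ++ (" " ++ val ++ " |")
      else ret ++ (" " ++ val ++ "\n")) acc).toList
    = acc.toList ++ pvFA c s l := by
  induction l with
  | nil => intro s acc; simp [PySem.List.enumerate_nil, pvFA]
  | cons v t ih =>
    intro s acc
    rw [PySem.List.enumerate_cons]
    have hcast : (s : Int) + 1 = ((s + 1 : Nat) : Int) := by push_cast; ring
    rw [List.foldl_cons]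
    simp only
    rw [hcast, ih (s + 1)]
    rw [PySem.Int.mod_natCast (s + 1) c]
    simp only [pvFA]
    by_cases hb : (s + 1) % c > 0
    · have hbi : ((((s + 1) % c : Nat) : Int) > 0) := by exact_mod_cast hb
      rw [if_pos hbi, if_pos hb]
      by_cases hv : v = 0 <;> simp [hv, pvCellC, PySem.Int.toList_toStr]
    · have hbi : ¬ ((((s + 1) % c : Nat) : Int) > 0) := by exact_mod_cast hb
      rw [if_neg hbi, if_neg hb]
      by_cases hv : v = 0 <;> simp [hv, pvCellC, PySem.Int.toList_toStr]

set_option maxHeartbeats 1000000 in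
lemma pvRow_full (c : Nat) (r : List Int) : ∀ (j : Nat) (rest : List Int),
    r ≠ [] → j + r.length = c →
    pvFA c j (r ++ rest)
      = ((' ' :: PySem.Chars.join [' ', '|', ' '] (r.map pvCellC)) ++ ['\n']) ++ pvFA c 0 rest := by
  induction r with
  | nil => intro j rest hne _; exact absurd rfl hne
  | cons v r ih =>
    intro j rest _ hlen
    cases r with
    | nil =>
      have hj : j + 1 = c := by simpa using hlen
      simp only [List.singleton_append, pvFA]
      rw [if_neg (by rw [hj, Nat.mod_self]; omega)]
      rw [pvFA_mod c rest (j + 1), hj, Nat.mod_self]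
      simp [PySem.Chars.join_singleton]
    | cons w r' =>
      have hlt : j + 1 < c := by simp only [List.length_cons] at hlen; omega
      rw [List.cons_append, pvFA, if_pos (by rw [Nat.mod_eq_of_lt hlt]; omega),
        ih (j + 1) rest (by simp) (by simp only [List.length_cons] at hlen ⊢; omega)]
      conv_rhs => rw [List.map_cons, List.map_cons, PySem.Chars.join_cons_cons]
      simp [List.append_assoc]

lemma pvRow_partial (c : Nat) (r : List Int) : ∀ (j : Nat),
    r ≠ [] → j + r.length < c →
    pvFA c j r = (' ' :: PySem.Chars.join [' ', '|', ' '] (r.map pvCellC)) ++ [' ', '|'] := by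
  induction r with
  | nil => intro j hne _; exact absurd rfl hne
  | cons v r ih =>
    intro j _ hlen
    cases r with
    | nil =>
      have hlt : j + 1 < c := by simpa using hlen
      simp only [pvFA]
      rw [if_pos (by rw [Nat.mod_eq_of_lt hlt]; omega)]
      simp [PySem.Chars.join_singleton]
    | cons w r' =>
      have hlt : j + 1 < c := by simp only [List.length_cons] at hlen; omega
      rw [pvFA, if_pos (by rw [Nat.mod_eq_of_lt hlt]; omega),
        ih (j + 1) (by simp) (by simp only [List.length_cons] at hlen ⊢; omega)]
      conv_rhs => rw [List.map_cons, List.map_cons, PySem.Chars.join_cons_cons]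
      simp [List.append_assoc]

-- B's port at char level equals pvFA
lemma pvB_toList (c : Nat) (hc : 0 < c) : ∀ (n : Nat) (l : List Int), l.length ≤ n →
    (pvRowsB c hc l).toList = pvFA c 0 l := by
  intro n
  induction n with
  | zero =>
    intro l hl
    have h0 : l = [] := List.eq_nil_of_length_eq_zero (by omega)
    subst h0; rw [pvRowsB]; simp [pvFA]
  | succ n ih =>
    intro l hl
    by_cases h : l = []
    · subst h; rw [pvRowsB]; simp [pvFA]
    · rw [pvRowsB]
      simp only [h, dite_false]
      rw [PySem.List.slice_to_natCast, PySem.List.slice_from_natCast]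
      have hdl : (l.drop c).length ≤ n := by
        have h1 : 0 < l.length := List.length_pos_iff.mpr h
        simp only [List.length_drop]; omega
      rw [String.toList_append, String.toList_append, String.toList_append,
        ih (l.drop c) hdl, PySem.Str.toList_join]
      have hmap : ((l.take c).map (fun v => if v = 0 then "N" else PySem.Int.toStr v)).map
          String.toList = (l.take c).map pvCellC := by
        rw [List.map_map]
        refine List.map_congr_left (fun v _ => ?_)
        by_cases hv : v = 0 <;> simp [hv, pvCellC, PySem.Int.toList_toStr]
      rw [hmap]
      by_cases hge : c ≤ l.length
      · have htl : (l.take c).length = c := by simp [List.length_take]; omega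
        rw [if_pos htl]
        conv_rhs => rw [← List.take_append_drop c l]
        rw [pvRow_full c (l.take c) 0 (l.drop c)
          (by intro hnil; rw [hnil] at htl; simp at htl; omega) (by omega)]
        have hsep : (" | " : String).toList = [' ', '|', ' '] := by decide
        have hsp : (" " : String).toList = [' '] := by decide
        have hnl : ("\n" : String).toList = ['\n'] := by decide
        rw [hsep, hsp, hnl]
        simp [List.append_assoc]
      · have hlt : l.length < c := by omega
        have htake : l.take c = l := List.take_of_length_le (by omega)
        have hdrop : l.drop c = [] := List.drop_eq_nil_of_le (by omega)
        rw [htake, hdrop]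
        rw [if_neg (by omega)]
        rw [pvRow_partial c l 0 h (by omega)]
        have hsep : (" | " : String).toList = [' ', '|', ' '] := by decide
        have hsp : (" " : String).toList = [' ']  := by decide
        have hbar : (" |" : String).toList = [' ', '|'] := by decide
        rw [hsep, hsp, hbar]
        simp [pvFA]

-- ===== VERDICT (by name: the statement is the Claim_ definition above) =====
theorem rep_node_spec : Claim_equal_rep_node := by
  intro node _
  unfold Spec_rep_node
  apply String.toList_inj.mp
  by_cases h : node = []
  · subst h; rfl
  · have hc : 0 < Nat.sqrt node.length := Nat.sqrt_pos.mpr (List.length_pos_iff.mpr h)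
    rw [rep_node_alt]
    simp only [h, dite_false]
    rw [pvB_toList _ _ node.length node le_rfl]
    show (rep_node node).toList = _
    rw [rep_node]
    simpa using pvA_toList (Nat.sqrt node.length) node 0 ""
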